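-- pv_equiv track=rewrite | github.com/codebit-hub/A-Maze-ing | mazegen/generator.py | _get_path_coords
-- ===== SOURCE A (Python) =====
-- def _get_path_coords(
--             start_x: int, start_y: int,
--             path_str: str) -> set[tuple[int, int]]:
--     """Converts directional string ('NESW') into coords (X, Y)"""
--     coords: set[tuple[int, int]] = set()
--     cx, cy = start_x, start_y
--     for move in path_str:
--         if move == 'N': cy -= 1
--         elif move == 'S': cy += 1
--         elif move == 'E': cx += 1
--         elif move == 'W': cx -= 1
--         coords.add((cx, cy))
--     return coords
-- ===== SOURCE B (Python) =====
-- def _get_path_coords(start_x, start_y, path_str):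
--     """Converts directional string ('NESW') into coords (X, Y)"""
--     def disp(s):
--         return (s.count('E') - s.count('W'), s.count('S') - s.count('N'))
--
--     def positions(s):
--         # relative positions visited along s, in path order
--         if len(s) <= 1:
--             return [disp(s)] if s else []
--         mid = len(s) // 2
--         dx, dy = disp(s[:mid])
--         return positions(s[:mid]) + [(dx + x, dy + y) for x, y in positions(s[mid:])]
--
--     return {(start_x + x, start_y + y) for x, y in positions(path_str)}
-- ===== Notes on version B (the rewrite author's own statement) =====
-- stated objective: alternative
-- what changed: Replaces A's single pass with a running (cx,cy) cursor by a divide-and-conquer over the path: each half's net displacement is obtained by character counts (count('E')-count('W'), ...), the right half's relative positions are translated by the left half's displacement and concatenated, and the result is shifted by the start point into a set once at the end.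
import Mathlib
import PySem

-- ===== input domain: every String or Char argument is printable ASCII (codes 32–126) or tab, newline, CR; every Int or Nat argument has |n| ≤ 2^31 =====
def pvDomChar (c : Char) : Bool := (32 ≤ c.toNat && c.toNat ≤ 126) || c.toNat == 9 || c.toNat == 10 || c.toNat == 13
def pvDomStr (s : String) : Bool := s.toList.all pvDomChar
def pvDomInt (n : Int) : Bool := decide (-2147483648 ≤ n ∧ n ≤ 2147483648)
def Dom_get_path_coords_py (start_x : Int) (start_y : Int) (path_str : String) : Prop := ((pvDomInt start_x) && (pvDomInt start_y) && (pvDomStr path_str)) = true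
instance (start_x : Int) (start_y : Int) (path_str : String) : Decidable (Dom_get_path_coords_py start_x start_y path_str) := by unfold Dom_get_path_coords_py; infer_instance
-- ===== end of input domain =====

-- B replaces A's one-pass running-cursor loop by a divide-and-conquer over the path:
-- half displacements via character counts, the right half's relative positions translated
-- and concatenated, shifted by the start into a set at the end (objective: alternative).

-- ===== PORT A =====
-- the for-loop of A, as structural recursion over the characters with state (coords, cx, cy)
def pvLoopA : List Char → PySem.Set (Int × Int) → Int → Int → PySem.Set (Int × Int)
  | [], coords, _, _ => coords
  | move :: rest, coords, cx, cy =>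
    let p :=
      if move = 'N' then (cx, cy - 1)
      else if move = 'S' then (cx, cy + 1)
      else if move = 'E' then (cx + 1, cy)
      else if move = 'W' then (cx - 1, cy)
      else (cx, cy)
    pvLoopA rest (PySem.Set.add coords p) p.1 p.2

def get_path_coords_py (start_x : Int) (start_y : Int) (path_str : String) : List (Int × Int) :=
  pvLoopA path_str.toList PySem.Set.empty start_x start_y

-- ===== PORT B =====
-- disp(s): net displacement of a move string via single-character counts
-- (Python str.count of a single char = List.count over the characters, exact here)
def pvDisp (s : List Char) : Int × Int :=
  ((PySem.List.count s 'E' : Int) - PySem.List.count s 'W',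
   (PySem.List.count s 'S' : Int) - PySem.List.count s 'N')

-- positions(s): divide and conquer.  s[:mid] / s[mid:] with 0 ≤ mid ≤ len(s) are
-- exactly take/drop.
def pvPositions (s : List Char) : List (Int × Int) :=
  if s.length ≤ 1 then (if s = [] then [] else [pvDisp s])
  else
    let mid := s.length / 2
    let d := pvDisp (s.take mid)
    pvPositions (s.take mid) ++
      (pvPositions (s.drop mid)).map (fun p => (d.1 + p.1, d.2 + p.2))
termination_by s.length
decreasing_by
  · simp [List.length_take]; omega
  · simp [List.length_drop]; omega

def get_path_coords_py_alt (start_x : Int) (start_y : Int) (path_str : String) : List (Int × Int) :=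
  PySem.Set.ofList ((pvPositions path_str.toList).map
    (fun p => (start_x + p.1, start_y + p.2)))

-- ===== PRECONDITION & SPEC =====
def Spec_get_path_coords_py (start_x : Int) (start_y : Int) (path_str : String) (out : List (Int × Int)) : Prop := out = get_path_coords_py_alt start_x start_y path_str
instance (start_x : Int) (start_y : Int) (path_str : String) (out : List (Int × Int)) : Decidable (Spec_get_path_coords_py start_x start_y path_str out) := by unfold Spec_get_path_coords_py; infer_instance

-- ===== CLAIM (what is proved, stated in full; the proofs are below) =====
def Claim_equal_get_path_coords_py : Prop := ∀ (start_x : Int) (start_y : Int) (path_str : String), Dom_get_path_coords_py start_x start_y path_str → Spec_get_path_coords_py start_x start_y path_str (get_path_coords_py start_x start_y path_str)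

-- ===== LEMMAS AND PROOFS =====

-- per-move delta
def pvDelta (m : Char) : Int × Int :=
  (if m = 'E' then 1 else if m = 'W' then -1 else 0,
   if m = 'S' then 1 else if m = 'N' then -1 else 0)

-- the list of positions A visits, in path order
def pvVisits : List Char → Int → Int → List (Int × Int)
  | [], _, _ => []
  | m :: cs, x, y =>
    (x + (pvDelta m).1, y + (pvDelta m).2) ::
      pvVisits cs (x + (pvDelta m).1) (y + (pvDelta m).2)

theorem pvLoopA_eq (cs : List Char) : ∀ (s : PySem.Set (Int × Int)) (x y : Int),
    pvLoopA cs s x y = PySem.Set.update s (pvVisits cs x y) := by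
  induction cs with
  | nil => intro s x y; rfl
  | cons m cs ih =>
    intro s x y
    simp only [pvLoopA, pvVisits, PySem.Set.update_cons, ih, pvDelta]
    by_cases hN : m = 'N' <;> by_cases hS : m = 'S' <;> by_cases hE : m = 'E' <;>
      by_cases hW : m = 'W' <;> simp_all [sub_eq_add_neg]

theorem pvDisp_nil : pvDisp [] = (0, 0) := rfl

theorem pvDisp_cons (m : Char) (cs : List Char) :
    pvDisp (m :: cs) = ((pvDelta m).1 + (pvDisp cs).1, (pvDelta m).2 + (pvDisp cs).2) := by
  simp only [pvDisp, pvDelta, PySem.List.count, List.count_cons]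
  by_cases hN : m = 'N' <;> by_cases hS : m = 'S' <;> by_cases hE : m = 'E' <;>
    by_cases hW : m = 'W' <;> simp_all <;> push_cast <;> ring_nf

theorem pvDisp_single (m : Char) : pvDisp [m] = pvDelta m := by
  simp [pvDisp_cons, pvDisp_nil]

theorem pvVisits_append (s t : List Char) : ∀ (x y : Int),
    pvVisits (s ++ t) x y =
      pvVisits s x y ++ pvVisits t (x + (pvDisp s).1) (y + (pvDisp s).2) := by
  induction s with
  | nil => intro x y; simp [pvVisits, pvDisp_nil]
  | cons m cs ih =>
    intro x y
    simp only [List.cons_append, pvVisits, ih, pvDisp_cons]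
    congr 2; ring_nf

theorem pvPositions_eq (n : Nat) : ∀ (s : List Char), s.length = n → ∀ (x y : Int),
    (pvPositions s).map (fun p => (x + p.1, y + p.2)) = pvVisits s x y := by
  induction n using Nat.strong_induction_on with
  | _ n ih =>
    intro s hlen x y
    rw [pvPositions]
    by_cases h1 : s.length ≤ 1
    · simp only [h1, if_pos]
      match s with
      | [] => simp [pvVisits]
      | [m] => simp [pvVisits, pvDisp_single]
      | _ :: _ :: _ => simp at h1
    · simp only [h1, if_neg, not_false_iff]
      have hmid1 : 1 ≤ s.length / 2 := by omega
      have hmid2 : s.length / 2 < s.length := by omega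
      have htake : (s.take (s.length / 2)).length = s.length / 2 := by
        simp [List.length_take]; omega
      have hdrop : (s.drop (s.length / 2)).length = s.length - s.length / 2 := by
        simp [List.length_drop]
      rw [List.map_append, List.map_map]
      rw [ih (s.length / 2) (by omega) _ htake x y]
      have hR := ih (s.length - s.length / 2) (by omega) _ hdrop
        (x + (pvDisp (s.take (s.length / 2))).1)
        (y + (pvDisp (s.take (s.length / 2))).2)
      rw [show ((fun p : Int × Int => (x + p.1, y + p.2)) ∘
            fun p : Int × Int => ((pvDisp (s.take (s.length / 2))).1 + p.1,
              (pvDisp (s.take (s.length / 2))).2 + p.2)) =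
          (fun p : Int × Int => (x + (pvDisp (s.take (s.length / 2))).1 + p.1,
              y + (pvDisp (s.take (s.length / 2))).2 + p.2)) by
        funext p; simp [Function.comp]; constructor <;> ring]
      rw [show (fun p : Int × Int => (x + (pvDisp (s.take (s.length / 2))).1 + p.1,
              y + (pvDisp (s.take (s.length / 2))).2 + p.2)) =
          (fun p : Int × Int => ((x + (pvDisp (s.take (s.length / 2))).1) + p.1,
              (y + (pvDisp (s.take (s.length / 2))).2) + p.2)) from rfl, hR]
      conv_rhs => rw [show s = s.take (s.length / 2) ++ s.drop (s.length / 2) by simp]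
      rw [pvVisits_append]

-- ===== VERDICT (by name: the statement is the Claim_ definition above) =====
theorem get_path_coords_py_spec : Claim_equal_get_path_coords_py := by
  intro sx sy p _
  show get_path_coords_py sx sy p = get_path_coords_py_alt sx sy p
  unfold get_path_coords_py get_path_coords_py_alt
  rw [pvLoopA_eq, pvPositions_eq p.toList.length p.toList rfl]
  simp [PySem.Set.update, PySem.Set.ofList_eq_foldl, PySem.Set.empty]
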